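-- pv_equiv track=rewrite | github.com/2yuna13/Algorithm | 프로그래머스/1/133499. 옹알이 （2）/옹알이 （2）.py | solution
-- ===== SOURCE A (Python) =====
-- def solution(babbling):
--     answer = 0
--     lst = ["aya", "ye", "woo", "ma"]
--
--     for word in babbling:
--         last_babble = ''
--         valid = True
--
--         while word:
--             found = False
--             for babble in lst:
--                 if word.startswith(babble):
--                     if last_babble == babble:
--                         valid = False
--                         break
--
--                     last_babble = babble
--                     word = word[len(babble):]
--                     found = True
--                     break
--
--             if not found:
--                 valid = False
--                 break
--
--         if valid and not word:
--             answer += 1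
--
--     return answer
-- ===== SOURCE B (Python) =====
-- # B: a streaming character-level DFA per word (no startswith, no slicing):
-- # state = (last_completed_syllable, progress) or None (dead); the four
-- # syllables have distinct first characters, so the automaton is deterministic.
--
-- BND, A1, A2, Y1, W1, W2, M1 = range(7)
--
--
-- def _step(state, c):
--     if state is None:
--         return None
--     last, prog = state
--     if prog == BND:
--         if c == 'a':
--             return (last, A1)
--         if c == 'y':
--             return (last, Y1)
--         if c == 'w':
--             return (last, W1)
--         if c == 'm':
--             return (last, M1)
--         return None
--     if prog == A1:
--         return (last, A2) if c == 'y' else None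
--     if prog == A2:
--         if c != 'a':
--             return None
--         return None if last == 'aya' else ('aya', BND)
--     if prog == Y1:
--         if c != 'e':
--             return None
--         return None if last == 'ye' else ('ye', BND)
--     if prog == W1:
--         return (last, W2) if c == 'o' else None
--     if prog == W2:
--         if c != 'o':
--             return None
--         return None if last == 'woo' else ('woo', BND)
--     # prog == M1
--     if c != 'a':
--         return None
--     return None if last == 'ma' else ('ma', BND)
--
--
-- def solution(babbling):
--     count = 0
--     for word in babbling:
--         state = (None, BND)
--         for c in word:
--             state = _step(state, c)
--         if state is not None and state[1] == BND:
--             count += 1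
--     return count
-- ===== Notes on version B (the rewrite author's own statement) =====
-- stated objective: alternative
-- what changed: B replaces A's consume loop (repeated startswith over the syllable list plus string slicing and last-syllable comparison) with a streaming character-level deterministic finite automaton: one fold over the word's characters with an explicit 8-state machine (boundary/mid-syllable progress plus last completed syllable, dead state on mismatch or repeat), correct because the four syllables start with distinct characters so the parse is deterministic.
import Mathlib
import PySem

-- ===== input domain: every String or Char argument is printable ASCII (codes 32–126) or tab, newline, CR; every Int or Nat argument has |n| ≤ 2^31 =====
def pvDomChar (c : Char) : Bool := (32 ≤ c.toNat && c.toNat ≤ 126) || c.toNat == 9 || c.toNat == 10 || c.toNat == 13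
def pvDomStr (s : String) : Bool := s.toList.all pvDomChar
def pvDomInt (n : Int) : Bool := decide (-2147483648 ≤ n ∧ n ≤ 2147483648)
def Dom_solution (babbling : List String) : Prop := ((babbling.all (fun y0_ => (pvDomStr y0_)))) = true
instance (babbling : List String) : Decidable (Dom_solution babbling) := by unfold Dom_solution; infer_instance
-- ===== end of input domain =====

-- B replaces A's slice-and-restart consume loop by a streaming character-level DFA
-- (one foldl over the word's characters with an explicit state machine); alternative, same cost.


-- ===== PORT A =====
def pvSylA : List (List Char) := [['a','y','a'], ['y','e'], ['w','o','o'], ['m','a']]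

-- A's `while word:` loop: scan the syllable list for a prefix (the for/`break`);
-- repeat ⇒ invalid; no match ⇒ invalid; returns `valid and not word`.
def pvALoop : List Char → List Char → Bool
  | [], _ => true
  | c :: cs, last =>
    match h : pvSylA.find? (fun b => List.isPrefixOf b (c :: cs)) with
    | none => false
    | some b =>
      if last == b then false
      else pvALoop ((c :: cs).drop b.length) b
termination_by w _ => w.length
decreasing_by
  have hb := List.mem_of_find?_eq_some h
  simp only [pvSylA, List.mem_cons, List.not_mem_nil, or_false] at hb
  rcases hb with rfl | rfl | rfl | rfl <;> simp

def solution (babbling : List String) : Int :=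
  babbling.foldl (fun answer w => if pvALoop w.toList [] then answer + 1 else answer) 0

-- ===== PORT B =====
-- Source B's DFA: last completed syllable
inductive PvSyl | aya | ye | woo | ma
deriving DecidableEq, Repr

-- Source B's progress marks BND, A1, A2, Y1, W1, W2, M1
inductive PvProg | bnd | a1 | a2 | y1 | w1 | w2 | m1
deriving DecidableEq, Repr

-- Source B's state: None (dead) or (last, progress)
def PvSt := Option (Option PvSyl × PvProg)

-- Source B's _step
def pvStep (st : PvSt) (c : Char) : PvSt :=
  match st with
  | none => none
  | some (last, prog) =>
    match prog with
    | .bnd =>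
      if c = 'a' then some (last, .a1)
      else if c = 'y' then some (last, .y1)
      else if c = 'w' then some (last, .w1)
      else if c = 'm' then some (last, .m1)
      else none
    | .a1 => if c = 'y' then some (last, .a2) else none
    | .a2 =>
      if c ≠ 'a' then none
      else if last = some .aya then none else some (some .aya, .bnd)
    | .y1 =>
      if c ≠ 'e' then none
      else if last = some .ye then none else some (some .ye, .bnd)
    | .w1 => if c = 'o' then some (last, .w2) else none
    | .w2 =>
      if c ≠ 'o' then none
      else if last = some .woo then none else some (some .woo, .bnd)
    | .m1 =>
      if c ≠ 'a' then none
      else if last = some .ma then none else some (some .ma, .bnd)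

-- Source B's final acceptance test: alive and at a syllable boundary
def pvAccept (st : PvSt) : Bool :=
  match st with
  | some (_, .bnd) => true
  | _ => false

def solution_alt (babbling : List String) : Int :=
  babbling.foldl (fun count w =>
    if pvAccept (w.toList.foldl pvStep (some (none, .bnd))) then count + 1 else count) 0

-- ===== PRECONDITION & SPEC =====
def Spec_solution (babbling : List String) (out : Int) : Prop := out = solution_alt babbling
instance (babbling : List String) (out : Int) : Decidable (Spec_solution babbling out) := by unfold Spec_solution; infer_instance

-- ===== CLAIM (what is proved, stated in full; the proofs are below) =====
def Claim_equal_solution : Prop := ∀ (babbling : List String), Dom_solution babbling → Spec_solution babbling (solution babbling)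

-- ===== LEMMAS AND PROOFS =====

theorem pvALoop_nil (last : List Char) : pvALoop [] last = true := by rw [pvALoop]

theorem pvALoop_cons (c : Char) (cs last : List Char) :
    pvALoop (c :: cs) last =
      (match pvSylA.find? (fun b => List.isPrefixOf b (c :: cs)) with
        | none => false
        | some b => if last == b then false else pvALoop ((c :: cs).drop b.length) b) := by
  rw [pvALoop]
  split <;> rename_i h' <;> simp [h']

-- dead state propagates through the fold
theorem pvFold_dead (l : List Char) : l.foldl pvStep none = none := by
  induction l with
  | nil => rfl
  | cons c cs ih => simpa [pvStep] using ih

-- encoding of A's last_babble string as B's last-syllable state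
def pvEnc : Option PvSyl → List Char
  | none => []
  | some .aya => ['a','y','a']
  | some .ye => ['y','e']
  | some .woo => ['w','o','o']
  | some .ma => ['m','a']

theorem pvEncBeq (L : Option PvSyl) (s : PvSyl) :
    (pvEnc L == pvEnc (some s)) = decide (L = some s) := by
  cases L with
  | none => cases s <;> decide
  | some t => cases t <;> cases s <;> decide

-- core invariant: A's consume loop agrees with B's DFA run from any boundary state
theorem pvMain : ∀ n (w : List Char), w.length ≤ n → ∀ (L : Option PvSyl),
    pvALoop w (pvEnc L) = pvAccept (w.foldl pvStep (some (L, .bnd))) := by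
  intro n
  induction n with
  | zero =>
    intro w hw L
    interval_cases h : w.length
    · rw [List.length_eq_zero_iff] at h; subst h
      simp [pvALoop_nil, pvAccept]
  | succ n ih =>
    intro w hw L
    match w with
    | [] => simp [pvALoop_nil, pvAccept]
    | c :: cs =>
      rw [pvALoop_cons]
      by_cases ha : c = 'a'
      · subst ha
        match cs with
        | [] =>
          simp [pvSylA, List.find?, List.isPrefixOf, pvStep, pvAccept]
        | c2 :: cs2 =>
          by_cases h2 : c2 = 'y'
          · subst h2
            match cs2 with
            | [] =>
              simp [pvSylA, List.find?, List.isPrefixOf, pvStep, pvAccept]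
            | c3 :: cs3 =>
              by_cases h3 : c3 = 'a'
              · subst h3
                have hfind : pvSylA.find? (fun b => List.isPrefixOf b ('a'::'y'::'a'::cs3)) = some ['a','y','a'] := by
                  simp [pvSylA, List.find?, List.isPrefixOf]
                rw [hfind]
                simp only [List.drop, List.length]
                rw [show (['a','y','a'] : List Char) = pvEnc (some PvSyl.aya) from rfl, pvEncBeq]
                by_cases hL : L = some PvSyl.aya
                · rw [if_pos (by simp [hL])]
                  simp [pvStep, hL, pvFold_dead, pvAccept]
                · rw [if_neg (by simp [hL])]
                  have := ih cs3 (by simp at hw; omega) (some .aya)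
                  rw [this]
                  simp [pvStep, hL]
              · -- 'a' 'y' (≠'a') …  : no syllable prefix; DFA dies at third char
                have h3' : ('a' == c3) = false := by simp only [beq_eq_false_iff_ne, ne_eq]; exact fun h => h3 h.symm
                have hfind : pvSylA.find? (fun b => List.isPrefixOf b ('a'::'y'::c3::cs3)) = none := by
                  simp [pvSylA, List.find?, List.isPrefixOf, h3']
                rw [hfind]
                simp [pvStep, h3, pvFold_dead, pvAccept]
          · have h2' : ('y' == c2) = false := by simp only [beq_eq_false_iff_ne, ne_eq]; exact fun h => h2 h.symm
            have hfind : pvSylA.find? (fun b => List.isPrefixOf b ('a'::c2::cs2)) = none := by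
              simp [pvSylA, List.find?, List.isPrefixOf, h2']
            rw [hfind]
            simp [pvStep, h2, pvFold_dead, pvAccept]
      · by_cases hy : c = 'y'
        · subst hy
          match cs with
          | [] => simp [pvSylA, List.find?, List.isPrefixOf, pvStep, pvAccept]
          | c2 :: cs2 =>
            by_cases h2 : c2 = 'e'
            · subst h2
              have hfind : pvSylA.find? (fun b => List.isPrefixOf b ('y'::'e'::cs2)) = some ['y','e'] := by
                simp [pvSylA, List.find?, List.isPrefixOf]
              rw [hfind]
              simp only [List.drop, List.length]
              rw [show (['y','e'] : List Char) = pvEnc (some PvSyl.ye) from rfl, pvEncBeq]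
              by_cases hL : L = some PvSyl.ye
              · rw [if_pos (by simp [hL])]
                simp [pvStep, hL, pvFold_dead, pvAccept]
              · rw [if_neg (by simp [hL])]
                have := ih cs2 (by simp at hw; omega) (some .ye)
                rw [this]
                simp [pvStep, hL]
            · have h2' : ('e' == c2) = false := by simp only [beq_eq_false_iff_ne, ne_eq]; exact fun h => h2 h.symm
              have hfind : pvSylA.find? (fun b => List.isPrefixOf b ('y'::c2::cs2)) = none := by
                simp [pvSylA, List.find?, List.isPrefixOf, h2']
              rw [hfind]
              simp [pvStep, h2, pvFold_dead, pvAccept]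
        · by_cases hw' : c = 'w'
          · subst hw'
            match cs with
            | [] => simp [pvSylA, List.find?, List.isPrefixOf, pvStep, pvAccept]
            | c2 :: cs2 =>
              by_cases h2 : c2 = 'o'
              · subst h2
                match cs2 with
                | [] => simp [pvSylA, List.find?, List.isPrefixOf, pvStep, pvAccept]
                | c3 :: cs3 =>
                  by_cases h3 : c3 = 'o'
                  · subst h3
                    have hfind : pvSylA.find? (fun b => List.isPrefixOf b ('w'::'o'::'o'::cs3)) = some ['w','o','o'] := by
                      simp [pvSylA, List.find?, List.isPrefixOf]
                    rw [hfind]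
                    simp only [List.drop, List.length]
                    rw [show (['w','o','o'] : List Char) = pvEnc (some PvSyl.woo) from rfl, pvEncBeq]
                    by_cases hL : L = some PvSyl.woo
                    · rw [if_pos (by simp [hL])]
                      simp [pvStep, hL, pvFold_dead, pvAccept]
                    · rw [if_neg (by simp [hL])]
                      have := ih cs3 (by simp at hw; omega) (some .woo)
                      rw [this]
                      simp [pvStep, hL]
                  · have h3' : ('o' == c3) = false := by simp only [beq_eq_false_iff_ne, ne_eq]; exact fun h => h3 h.symm
                    have hfind : pvSylA.find? (fun b => List.isPrefixOf b ('w'::'o'::c3::cs3)) = none := by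
                      simp [pvSylA, List.find?, List.isPrefixOf, h3']
                    rw [hfind]
                    simp [pvStep, h3, pvFold_dead, pvAccept]
              · have h2' : ('o' == c2) = false := by simp only [beq_eq_false_iff_ne, ne_eq]; exact fun h => h2 h.symm
                have hfind : pvSylA.find? (fun b => List.isPrefixOf b ('w'::c2::cs2)) = none := by
                  simp [pvSylA, List.find?, List.isPrefixOf, h2']
                rw [hfind]
                simp [pvStep, h2, pvFold_dead, pvAccept]
          · by_cases hm : c = 'm'
            · subst hm
              match cs with
              | [] => simp [pvSylA, List.find?, List.isPrefixOf, pvStep, pvAccept]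
              | c2 :: cs2 =>
                by_cases h2 : c2 = 'a'
                · subst h2
                  have hfind : pvSylA.find? (fun b => List.isPrefixOf b ('m'::'a'::cs2)) = some ['m','a'] := by
                    simp [pvSylA, List.find?, List.isPrefixOf]
                  rw [hfind]
                  simp only [List.drop, List.length]
                  rw [show (['m','a'] : List Char) = pvEnc (some PvSyl.ma) from rfl, pvEncBeq]
                  by_cases hL : L = some PvSyl.ma
                  · rw [if_pos (by simp [hL])]
                    simp [pvStep, hL, pvFold_dead, pvAccept]
                  · rw [if_neg (by simp [hL])]
                    have := ih cs2 (by simp at hw; omega) (some .ma)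
                    rw [this]
                    simp [pvStep, hL]
                · have h2' : ('a' == c2) = false := by simp only [beq_eq_false_iff_ne, ne_eq]; exact fun h => h2 h.symm
                  have hfind : pvSylA.find? (fun b => List.isPrefixOf b ('m'::c2::cs2)) = none := by
                    simp [pvSylA, List.find?, List.isPrefixOf, h2']
                  rw [hfind]
                  simp [pvStep, h2, pvFold_dead, pvAccept]
            · have ha' : ('a' == c) = false := by simp only [beq_eq_false_iff_ne, ne_eq]; exact fun h => ha h.symm
              have hy' : ('y' == c) = false := by simp only [beq_eq_false_iff_ne, ne_eq]; exact fun h => hy h.symm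
              have hww : ('w' == c) = false := by simp only [beq_eq_false_iff_ne, ne_eq]; exact fun h => hw' h.symm
              have hm' : ('m' == c) = false := by simp only [beq_eq_false_iff_ne, ne_eq]; exact fun h => hm h.symm
              have hfind : pvSylA.find? (fun b => List.isPrefixOf b (c::cs)) = none := by
                simp [pvSylA, List.find?, List.isPrefixOf, ha', hy', hww, hm']
              rw [hfind]
              simp [pvStep, ha, hy, hw', hm, pvFold_dead, pvAccept]

theorem pvWord_eq (w : List Char) :
    pvALoop w [] = pvAccept (w.foldl pvStep (some (none, .bnd))) := by
  have := pvMain w.length w le_rfl none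
  simpa [pvEnc] using this

-- ===== VERDICT (by name: the statement is the Claim_ definition above) =====
theorem solution_spec : Claim_equal_solution := by
  intro babbling _
  unfold Spec_solution solution solution_alt
  have hstep : (fun (answer : Int) (w : String) => if pvALoop w.toList [] then answer + 1 else answer)
      = (fun (count : Int) (w : String) =>
          if pvAccept (w.toList.foldl pvStep (some (none, .bnd))) then count + 1 else count) := by
    funext a w
    rw [pvWord_eq]
  rw [hstep]
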